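-- pv_equiv track=rewrite | github.com/milez0/WWU-Projects | foobar/hey_i_already_did_that.py | answer
-- ===== SOURCE A (Python) =====
-- def answer(n, b) :
--     L = len(n)
--     N = []
--     for char in n :
--         N.append(int(char))
--     H = [N[:]]
--     while True :
--         N.sort()
--         R = N[:]
--         R.reverse()
--         S = []
--         for i in range(L) :
--             S.append(N[i] - R[i])
--         for i in range(L) :
--             while (S[i] < 0) :
--                 S[i] += b
--                 S[i+1] -= 1
--         S.reverse()
--         if (S in H) :
--             return len(H) - H.index(S)
--         H.append(S[:])
--         N = S
-- ===== SOURCE B (Python) =====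
-- def answer(n, b):
--     L = len(n)
--
--     def step(N):
--         a = sorted(N)
--         S = [a[i] - a[L - 1 - i] for i in range(L)]
--         for i in range(L):
--             while S[i] < 0:
--                 S[i] += b
--                 S[i + 1] -= 1
--         S.reverse()
--         return S
--
--     # Phase 1: walk the orbit until the current state has been seen before;
--     # that state is the entry of the cycle (no positions are recorded).
--     N = [int(c) for c in n]
--     seen = set()
--     while tuple(N) not in seen:
--         seen.add(tuple(N))
--         N = step(N)
--     # Phase 2: measure the period by walking the cycle once from that state.
--     anchor = N
--     N = step(N)
--     k = 1
--     while N != anchor: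
--         N = step(N)
--         k += 1
--     return k
-- ===== Notes on version B (the rewrite author's own statement) =====
-- stated objective: alternative
-- what changed: A records the whole history with positions and computes the answer arithmetically as len(H)-H.index(S) at the first repeat; B keeps no positions at all: a first phase walks the orbit with only a membership set until it reaches a state already visited (a state on the cycle), and a second phase measures the cycle length directly by walking the cycle once until that state recurs; the Kaprekar-like transform (sort, digit-wise subtract, borrow loop) is kept exact.
import Mathlib
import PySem

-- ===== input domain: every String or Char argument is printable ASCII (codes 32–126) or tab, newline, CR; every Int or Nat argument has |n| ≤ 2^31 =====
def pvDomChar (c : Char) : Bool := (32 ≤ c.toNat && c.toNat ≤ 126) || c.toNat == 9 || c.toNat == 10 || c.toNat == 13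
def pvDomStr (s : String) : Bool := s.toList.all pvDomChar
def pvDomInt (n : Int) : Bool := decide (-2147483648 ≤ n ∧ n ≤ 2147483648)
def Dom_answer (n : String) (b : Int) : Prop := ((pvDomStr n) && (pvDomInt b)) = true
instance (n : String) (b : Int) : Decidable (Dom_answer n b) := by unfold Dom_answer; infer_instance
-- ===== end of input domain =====

-- B keeps no history and no positions: phase 1 walks the orbit with only a membership
-- set until it reaches a state already seen (a state on the cycle), phase 2 measures the
-- cycle length by walking the cycle once; the digit transform itself is kept exact.

-- ===== PORT A =====
-- int(char) (both programs parse digits this way; Pre_ guarantees the char is a digit)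
def pvDigit (c : Char) : Int := (PySem.Int.ofStr? (String.ofList [c])).getD 0

-- fuel for the unbounded while-loops (never exhausted on inputs satisfying Pre_)
def pvFuel : Nat := 2 ^ 64

-- `while S[i] < 0: S[i] += b; S[i+1] -= 1` — identical lines in Source A and Source B, shared
def pvBorrow (b : Int) (i : Nat) : Nat → List Int → List Int
  | 0, S => S
  | fuel + 1, S =>
    if S.getD i 0 < 0 then
      pvBorrow b i fuel ((S.set i (S.getD i 0 + b)).set (i + 1) (S.getD (i + 1) 0 - 1))
    else S

-- A's `while True` loop: state N plus the history list H
def answerLoop (b : Int) (L : Nat) : Nat → List Int → List (List Int) → Int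
  | 0, _, _ => 0
  | fuel + 1, N, H =>
    let Ns := PySem.List.sorted N (fun x => x) false
    let R := Ns.reverse
    let S0 := (PySem.List.pyRange 0 (L : Int) 1).foldl
      (fun S i => S ++ [PySem.List.pyGetD Ns i 0 - PySem.List.pyGetD R i 0]) []
    let S1 := (PySem.List.pyRange 0 (L : Int) 1).foldl (fun S i => pvBorrow b i.toNat pvFuel S) S0
    let S := S1.reverse
    if S ∈ H then (H.length : Int) - (((PySem.List.index? H S).getD 0 : Nat) : Int)
    else answerLoop b L fuel S (H ++ [S])

def answer (n : String) (b : Int) : Int :=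
  let L := n.toList.length
  let N := n.toList.foldl (fun acc c => acc ++ [pvDigit c]) []
  answerLoop b L pvFuel N [N]

-- ===== PORT B =====
-- Source B's nested `step`: differences read from the sorted list, then borrow, then reverse
def pvStep (b : Int) (L : Nat) (N : List Int) : List Int :=
  let a := PySem.List.sorted N (fun x => x) false
  let S0 := (PySem.List.pyRange 0 (L : Int) 1).map
    (fun i => PySem.List.pyGetD a i 0 - PySem.List.pyGetD a ((L : Int) - 1 - i) 0)
  let S1 := (PySem.List.pyRange 0 (L : Int) 1).foldl (fun S i => pvBorrow b i.toNat pvFuel S) S0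
  S1.reverse

-- Source B's phase 2: `k = 1; N = step(anchor); while N != anchor: N = step(N); k += 1`
def answerPhase2 (b : Int) (L : Nat) (anchor : List Int) : Nat → List Int → Int → Int
  | 0, _, _ => 0
  | fuel + 1, N, k =>
    if N == anchor then k
    else answerPhase2 b L anchor fuel (pvStep b L N) (k + 1)

-- Source B's phase 1: `while tuple(N) not in seen: seen.add(tuple(N)); N = step(N)`
def answerPhase1 (b : Int) (L : Nat) : Nat → List Int → PySem.Set (List Int) → Int
  | 0, _, _ => 0
  | fuel + 1, N, seen =>
    if PySem.Set.contains seen N then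
      answerPhase2 b L N (pvFuel + 1) (pvStep b L N) 1
    else answerPhase1 b L fuel (pvStep b L N) (PySem.Set.add seen N)

def answer_alt (n : String) (b : Int) : Int :=
  let L := n.toList.length
  let N := n.toList.map pvDigit
  answerPhase1 b L (pvFuel + 1) N PySem.Set.empty

-- ===== PRECONDITION & SPEC =====
-- Pre_ excludes inputs where A raises (a non-digit char: int(char) is ValueError) and where A
-- never returns (b ≤ 0 with at least two distinct digits: the borrow while-loop diverges).
def Pre_answer (n : String) (b : Int) : Prop :=
  n.toList.all (fun c => c.isDigit) = true ∧
    (1 ≤ b ∨ n.toList.all (fun c => n.toList.all (fun c' => c == c')) = true)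
instance (n : String) (b : Int) : Decidable (Pre_answer n b) := by unfold Pre_answer; infer_instance

def pvWitness_answer : String × Int := ("210", 10)

def Spec_answer (n : String) (b : Int) (out : Int) : Prop := out = answer_alt n b
instance (n : String) (b : Int) (out : Int) : Decidable (Spec_answer n b out) := by unfold Spec_answer; infer_instance

-- ===== CLAIM (what is proved, stated in full; the proofs are below) =====
def Claim_equal_answer : Prop := ∀ (n : String) (b : Int), Dom_answer n b → Pre_answer n b → Spec_answer n b (answer n b)

-- ===== LEMMAS AND PROOFS =====

-- pvBorrow preserves the length of the list
lemma pvBorrow_length (b : Int) (i : Nat) : ∀ (fuel : Nat) (S : List Int),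
    (pvBorrow b i fuel S).length = S.length := by
  intro fuel
  induction fuel with
  | zero => intro S; simp [pvBorrow]
  | succ f ih => intro S; simp [pvBorrow]; split <;> simp [ih]

-- a fold of pvBorrow steps preserves the length too
lemma pvBorrowFold_length (b : Int) (r : List Int) (l : List Int) :
    (r.foldl (fun S i => pvBorrow b i.toNat pvFuel S) l).length = l.length := by
  induction r generalizing l with
  | nil => rfl
  | cons h t iht => simp [List.foldl_cons, iht, pvBorrow_length]

-- pvStep always returns a list of length L
lemma pvStep_length (b : Int) (L : Nat) (N : List Int) : (pvStep b L N).length = L := by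
  simp only [pvStep]
  rw [List.length_reverse, pvBorrowFold_length, List.length_map,
     PySem.List.length_pyRange_one]
  omega

-- the body of A's loop computes exactly pvStep, given len(N) = L
lemma step_eq (b : Int) (L : Nat) (N : List Int) (hN : N.length = L) :
    ((PySem.List.pyRange 0 (L : Int) 1).foldl (fun S i => pvBorrow b i.toNat pvFuel S)
      ((PySem.List.pyRange 0 (L : Int) 1).foldl
        (fun S i => S ++ [PySem.List.pyGetD (PySem.List.sorted N (fun x => x) false) i 0
          - PySem.List.pyGetD (PySem.List.sorted N (fun x => x) false).reverse i 0]) [])).reverse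
    = pvStep b L N := by
  simp only [pvStep]
  congr 1
  rw [PySem.List.foldl_append_singleton_eq_map, List.nil_append]
  congr 1
  apply List.map_congr_left
  intro i hi
  rw [PySem.List.mem_pyRange_one] at hi
  set Ns := PySem.List.sorted N (fun x => x) false with hNs
  have hlen : Ns.length = L := by rw [hNs, PySem.List.length_sorted, hN]
  have h0 : (0 : Int) ≤ i := hi.1
  have hiL : i < (L : Int) := hi.2
  have hit : i.toNat < L := by omega
  congr 1
  rw [PySem.List.pyGetD_eq_getElem Ns.reverse 0 h0
        (by rw [List.length_reverse, hlen]; exact_mod_cast hiL),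
      PySem.List.pyGetD_eq_getElem Ns 0 (by omega) (by rw [hlen]; omega),
      List.getElem_reverse]
  have hidx : Ns.length - 1 - i.toNat = ((L : Int) - 1 - i).toNat := by rw [hlen]; omega
  congr 1

-- phase 2 measures exactly the minimal period d of a cyclic state
lemma phase2_eq (b : Int) (L : Nat) (anchor : List Int) (d : Nat)
    (hcyc : (pvStep b L)^[d] anchor = anchor)
    (hmin : ∀ p, 1 ≤ p → p < d → (pvStep b L)^[p] anchor ≠ anchor) :
    ∀ (f k : Nat), 1 ≤ k → k ≤ d → d < k + f →
    answerPhase2 b L anchor f ((pvStep b L)^[k] anchor) (k : Int) = (d : Int) := by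
  intro f
  induction f with
  | zero => intro k h1 h2 h3; omega
  | succ f ih =>
    intro k h1 h2 h3
    by_cases hk : k = d
    · subst hk
      simp [answerPhase2, hcyc]
    · have hne : (pvStep b L)^[k] anchor ≠ anchor := hmin k h1 (by omega)
      simp only [answerPhase2, beq_iff_eq, if_neg hne]
      rw [← Function.iterate_succ_apply' (pvStep b L) k anchor]
      have := ih (k + 1) (by omega) (by omega) (by omega)
      push_cast at this ⊢
      exact this

-- the two programs agree: A's loop versus B's two phases, in lockstep on the orbit
lemma loop_eq (b : Int) (L : Nat) (x0 : List Int) (hx0 : x0.length = L) :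
    ∀ (f m : Nat) (seen : PySem.Set (List Int)), 1 ≤ m →
    ((List.range m).map (fun i => (pvStep b L)^[i] x0)).Nodup →
    (∀ x, x ∈ seen ↔ x ∈ (List.range m).map (fun i => (pvStep b L)^[i] x0)) →
    f + m ≤ pvFuel + 1 →
    answerLoop b L f ((pvStep b L)^[m - 1] x0)
        ((List.range m).map (fun i => (pvStep b L)^[i] x0))
      = answerPhase1 b L f ((pvStep b L)^[m] x0) seen := by
  intro f
  induction f with
  | zero => intro m seen _ _ _ _; rfl
  | succ f ih =>
    intro m seen hm hnd hmem hfuel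
    set g := pvStep b L with hg
    set H := (List.range m).map (fun i => g^[i] x0) with hH
    have hNlen : (g^[m - 1] x0).length = L := by
      cases Nat.eq_or_lt_of_le hm with
      | inl h => simpa [← h] using hx0
      | inr h =>
        rw [show m - 1 = (m - 2) + 1 by omega, Function.iterate_succ_apply', hg]
        exact pvStep_length b L _
    have hstep : g (g^[m - 1] x0) = g^[m] x0 := by
      conv_rhs => rw [show m = (m - 1) + 1 by omega]
      rw [Function.iterate_succ_apply']
    have hHlen : H.length = m := by simp [hH]
    have hHget : ∀ (i : Nat) (h : i < m), H[i]'(by simpa [hHlen]) = g^[i] x0 := by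
      intro i h; simp [hH]
    simp only [answerLoop, answerPhase1]
    rw [step_eq b L _ hNlen, ← hg, hstep]
    set S := g^[m] x0 with hS
    by_cases hmemS : S ∈ H
    · rw [if_pos hmemS]
      rw [show (PySem.Set.contains seen S) = true by
        rw [PySem.Set.contains_iff]; exact (hmem S).2 hmemS]
      simp only [if_true]
      -- A returns m - j where H[j] = S; phase 2 measures the same period d = m - j
      rcases Option.isSome_iff_exists.1 ((PySem.List.index?_isSome_iff H S).2 hmemS)
        with ⟨j, hj⟩
      rcases PySem.List.getElem_of_index?_eq_some hj with ⟨hjlt, hjget, _⟩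
      rw [hHlen] at hjlt
      have hSj : S = g^[j] x0 := by rw [← hHget j hjlt]; exact hjget.symm
      have hcyc : g^[m - j] S = S := by
        rw [hSj, ← Function.iterate_add_apply]
        rw [show m - j + j = m by omega, ← hS, hSj]
      have hmin : ∀ p, 1 ≤ p → p < m - j → g^[p] S ≠ S := by
        intro p hp1 hpd heq
        have h1 : g^[p] S = g^[p + j] x0 := by
          rw [hSj, ← Function.iterate_add_apply]
        have h2 : H[p + j]'(by omega) = H[j]'(by omega) := by
          rw [hHget _ (by omega), hHget _ hjlt, ← h1, heq, hSj]
        have := (List.Nodup.getElem_inj_iff hnd).1 h2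
        omega
      have hd1 : 1 ≤ m - j := by omega
      have hdf : m - j < 1 + (pvFuel + 1) := by omega
      have := phase2_eq b L S (m - j) hcyc hmin (pvFuel + 1) 1 le_rfl hd1 hdf
      rw [Function.iterate_one] at this
      rw [hj]
      simp only [Option.getD_some]
      rw [show ((1 : Nat) : Int) = (1 : Int) from rfl] at this
      rw [this, hHlen]
      omega
    · rw [if_neg hmemS]
      rw [show (PySem.Set.contains seen S) = false by
        rw [← Bool.not_eq_true, PySem.Set.contains_iff]
        exact fun h => hmemS ((hmem S).1 h)]
      simp only [Bool.false_eq_true, if_false]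
      have hHext : H ++ [S] = (List.range (m + 1)).map (fun i => g^[i] x0) := by
        rw [List.range_succ, List.map_append, hH]; rfl
      rw [hHext]
      have hrec := ih (m + 1) (PySem.Set.add seen S) (by omega)
        (by
          rw [← hHext]
          rw [List.nodup_append]
          exact ⟨hnd, List.nodup_singleton S, by
            intro a ha b hb
            simp only [List.mem_singleton] at hb
            subst hb
            exact fun hc => hmemS (hc ▸ ha)⟩)
        (by
          intro x
          rw [← hHext, PySem.Set.mem_add, List.mem_append, List.mem_singleton, hmem x])
        (by omega)
      rw [show m + 1 - 1 = m by omega, Function.iterate_succ_apply'] at hrec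
      rw [← hS] at hrec
      exact hrec

-- ===== VERDICT (by name: the statement is the Claim_ definition above) =====
theorem answer_spec : Claim_equal_answer := by
  intro n b _ _
  unfold Spec_answer answer answer_alt
  simp only [PySem.List.foldl_append_singleton_eq_map, List.nil_append]
  set L := n.toList.length
  set x0 := n.toList.map pvDigit with hx0
  have hlen : x0.length = L := by simp [hx0, L]
  -- unfold the first phase-1 iteration (the empty set never contains x0)
  show answerLoop b L pvFuel x0 [x0]
      = answerPhase1 b L (pvFuel + 1) x0 PySem.Set.empty
  rw [show answerPhase1 b L (pvFuel + 1) x0 PySem.Set.empty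
      = answerPhase1 b L pvFuel (pvStep b L x0) (PySem.Set.add PySem.Set.empty x0) by
    simp [answerPhase1, PySem.Set.empty, PySem.Set.contains]]
  have := loop_eq b L x0 hlen pvFuel 1 (PySem.Set.add PySem.Set.empty x0) le_rfl
    (by simp) (by simp [PySem.Set.empty]) (by omega)
  simpa using this
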